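-- pv_equiv track=rewrite | github.com/Arsen1302/Code-copy-detector | TestData/solutions/problem_1261_3.py | solution_1261_3
-- ===== SOURCE A (Python) =====
-- from typing import List
--
-- def solution_1261_3(logs: List[List[int]]) -> int:
--     b=[logs[i][0] for i in range(len(logs))]
--     d=[logs[i][1] for i in range(len(logs))]
--     m=0 #max population
--     a=0 #alive
--     r=1950
--     for i in range(1950,2051):
--         a+=b.count(i)-d.count(i)
--         if a>m:
--             m=a
--             r=i
--     return r
-- ===== SOURCE B (Python) =====
-- from typing import List
--
-- def solution_1261_3(logs: List[List[int]]) -> int: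
--     # Line sweep: sort the in-range (year, delta) events by year, then walk the
--     # sorted events once, comparing the running population at each year boundary.
--     events = [(log[0], 1) for log in logs if 1950 <= log[0] <= 2050] \
--            + [(log[1], -1) for log in logs if 1950 <= log[1] <= 2050]
--     events.sort(key=lambda e: e[0])
--     best_year, best_pop, alive = 1950, 0, 0
--     n = len(events)
--     for j in range(n):
--         year, delta = events[j]
--         alive += delta
--         if j + 1 == n or events[j + 1][0] != year:
--             if alive > best_pop:
--                 best_year, best_pop = year, alive
--     return best_year
-- ===== Notes on version B (the rewrite author's own statement) =====
-- stated objective: alternative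
-- what changed: Instead of scanning all 101 calendar years and rescanning the logs twice per year with .count, B builds in-range (year, +/-1) events, sorts them by year, and does one line sweep over the sorted events, comparing the running population at each year-group boundary.
import Mathlib
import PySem

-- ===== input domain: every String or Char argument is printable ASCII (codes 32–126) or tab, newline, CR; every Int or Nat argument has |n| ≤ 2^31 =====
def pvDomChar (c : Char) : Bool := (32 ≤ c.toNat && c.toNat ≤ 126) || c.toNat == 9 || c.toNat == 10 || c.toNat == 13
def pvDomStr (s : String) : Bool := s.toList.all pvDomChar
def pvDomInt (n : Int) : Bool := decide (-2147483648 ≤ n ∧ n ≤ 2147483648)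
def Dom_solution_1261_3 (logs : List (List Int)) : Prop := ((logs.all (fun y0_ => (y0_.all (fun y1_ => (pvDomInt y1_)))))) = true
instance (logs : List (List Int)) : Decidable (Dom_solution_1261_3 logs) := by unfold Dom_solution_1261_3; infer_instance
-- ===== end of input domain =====

-- B replaces A's scan over the 101 calendar years (each with two full rescans of the logs)
-- by a line sweep: sort the in-range (year, ±1) events by year and walk them once (alternative).

-- ===== PORT A =====
def solution_1261_3 (logs : List (List Int)) : Int :=
  let b := (PySem.List.pyRange 0 (logs.length : Int) 1).map
    (fun i => PySem.List.pyGetD (PySem.List.pyGetD logs i []) 0 0)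
  let d := (PySem.List.pyRange 0 (logs.length : Int) 1).map
    (fun i => PySem.List.pyGetD (PySem.List.pyGetD logs i []) 1 0)
  let s := (PySem.List.pyRange 1950 2051 1).foldl
    (fun (s : Int × Int × Int) i =>
      let a := s.2.1 + (PySem.List.count b i : Int) - (PySem.List.count d i : Int)
      if a > s.1 then (a, a, i) else (s.1, a, s.2.2))
    (0, 0, 1950)
  s.2.2

-- ===== PORT B =====
-- Source B's indexed for-loop with lookahead 'j + 1 == n or events[j+1][0] != year', as structural recursion
def pvSweep : List (Int × Int) → Int → Int → Int → Int
  | [], best_year, _best_pop, _alive => best_year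
  | [(year, delta)], best_year, best_pop, alive =>
      -- last event: 'j + 1 == n' holds, compare
      if alive + delta > best_pop then year else best_year
  | (year, delta) :: (y2, d2) :: t', best_year, best_pop, alive =>
      -- lookahead 'events[j+1][0] != year' decides whether to compare
      if y2 ≠ year then
        if alive + delta > best_pop then pvSweep ((y2, d2) :: t') year (alive + delta) (alive + delta)
        else pvSweep ((y2, d2) :: t') best_year best_pop (alive + delta)
      else pvSweep ((y2, d2) :: t') best_year best_pop (alive + delta)

def solution_1261_3_alt (logs : List (List Int)) : Int :=
  let events :=
    ((logs.filter (fun log => decide (1950 ≤ PySem.List.pyGetD log 0 0 ∧ PySem.List.pyGetD log 0 0 ≤ 2050))).map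
      (fun log => (PySem.List.pyGetD log 0 0, (1 : Int))))
    ++ ((logs.filter (fun log => decide (1950 ≤ PySem.List.pyGetD log 1 0 ∧ PySem.List.pyGetD log 1 0 ≤ 2050))).map
      (fun log => (PySem.List.pyGetD log 1 0, (-1 : Int))))
  let sortedEvents := PySem.List.sorted events (fun e => e.1) false
  pvSweep sortedEvents 1950 0 0

-- ===== PRECONDITION & SPEC =====
-- Pre_ excludes exactly the inputs where Python A raises IndexError: some log with fewer than 2 entries.
def Pre_solution_1261_3 (logs : List (List Int)) : Prop := ∀ l ∈ logs, 2 ≤ l.length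
instance (logs : List (List Int)) : Decidable (Pre_solution_1261_3 logs) := by unfold Pre_solution_1261_3; infer_instance
def pvWitness_solution_1261_3 : List (List Int) := [[1950, 1961], [1960, 1971]]

def Spec_solution_1261_3 (logs : List (List Int)) (out : Int) : Prop := out = solution_1261_3_alt logs
instance (logs : List (List Int)) (out : Int) : Decidable (Spec_solution_1261_3 logs out) := by unfold Spec_solution_1261_3; infer_instance

-- ===== CLAIM (what is proved, stated in full; the proofs are below) =====
def Claim_equal_solution_1261_3 : Prop := ∀ (logs : List (List Int)), Dom_solution_1261_3 logs → Pre_solution_1261_3 logs → Spec_solution_1261_3 logs (solution_1261_3 logs)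

-- ===== LEMMAS AND PROOFS =====

-- proof-side vocabulary
def pvBirths (logs : List (List Int)) : List Int := logs.map (fun l => PySem.List.pyGetD l 0 0)
def pvDeaths (logs : List (List Int)) : List Int := logs.map (fun l => PySem.List.pyGetD l 1 0)
-- per-year population delta as A computes it
def pvC (logs : List (List Int)) (y : Int) : Int :=
  ((pvBirths logs).count y : Int) - ((pvDeaths logs).count y : Int)
-- the canonical year-scan step/fold (A's loop body)
def pvStep (c : Int → Int) (s : Int × Int × Int) (y : Int) : Int × Int × Int :=
  let a := s.2.1 + c y
  if a > s.1 then (a, a, y) else (s.1, a, s.2.2)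
def pvF (c : Int → Int) (ys : List Int) (s : Int × Int × Int) : Int × Int × Int :=
  ys.foldl (pvStep c) s
-- net delta of a year inside an event list
def pvG (E : List (Int × Int)) (y : Int) : Int :=
  ((E.filter (fun p => p.1 == y)).map Prod.snd).sum
-- the distinct years of a year-sorted event list, in sweep order
def pvYears : List (Int × Int) → List Int
  | [] => []
  | (y, _) :: t =>
      match t with
      | [] => [y]
      | (y2, _) :: _ => if y2 = y then pvYears t else y :: pvYears t

theorem pvG_cons (p : Int × Int) (t : List (Int × Int)) (y : Int) :
    pvG (p :: t) y = (if p.1 = y then p.2 else 0) + pvG t y := by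
  simp only [pvG, List.filter_cons, beq_iff_eq]
  split_ifs <;> simp

theorem pvG_not_mem (E : List (Int × Int)) (y : Int) (h : y ∉ E.map Prod.fst) :
    pvG E y = 0 := by
  induction E with
  | nil => rfl
  | cons p t ih =>
    simp only [List.map_cons, List.mem_cons, not_or] at h
    rw [pvG_cons, if_neg (fun e => h.1 e.symm), ih h.2, add_zero]

theorem pvG_append (E1 E2 : List (Int × Int)) (y : Int) :
    pvG (E1 ++ E2) y = pvG E1 y + pvG E2 y := by
  simp [pvG, List.filter_append]

theorem pvG_perm (E1 E2 : List (Int × Int)) (h : E1.Perm E2) (y : Int) :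
    pvG E1 y = pvG E2 y :=
  List.Perm.sum_eq (List.Perm.map _ (List.Perm.filter _ h))

theorem pvG_map_const (X : List Int) (c y : Int) :
    pvG (X.map (fun b => (b, c))) y = c * (X.count y : Int) := by
  induction X with
  | nil => simp [pvG]
  | cons x t ih =>
    rw [List.map_cons, pvG_cons, ih, List.count_cons]
    simp only [beq_iff_eq]
    split_ifs <;> push_cast <;> ring

theorem mem_pvYears (E : List (Int × Int)) (z : Int) :
    z ∈ pvYears E ↔ z ∈ E.map Prod.fst := by
  induction E with
  | nil => simp [pvYears]
  | cons p t ih =>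
    obtain ⟨y, d⟩ := p
    cases t with
    | nil => simp [pvYears]
    | cons q t' =>
      obtain ⟨y2, d2⟩ := q
      by_cases h : y2 = y
      · subst h
        rw [show pvYears ((y2, d) :: (y2, d2) :: t') = pvYears ((y2, d2) :: t') from by
          simp [pvYears]]
        rw [ih]
        simp only [List.map_cons, List.mem_cons]
        tauto
      · rw [show pvYears ((y, d) :: (y2, d2) :: t') = y :: pvYears ((y2, d2) :: t') from by
          simp [pvYears, h]]
        simp only [List.mem_cons, ih, List.map_cons]

-- head and strictness of pvYears on a year-sorted event list
theorem pvYears_head (y d : Int) (t : List (Int × Int))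
    (hs : (((y, d) :: t)).Pairwise (fun p q => p.1 ≤ q.1)) :
    ∃ rest, pvYears ((y, d) :: t) = y :: rest ∧ ∀ z ∈ rest, y < z := by
  induction t generalizing y d with
  | nil => exact ⟨[], rfl, by simp⟩
  | cons q t' ih =>
    obtain ⟨y2, d2⟩ := q
    have hle : y ≤ y2 := (List.pairwise_cons.mp hs).1 _ (List.mem_cons_self)
    have hs' : (((y2, d2) :: t')).Pairwise (fun p q => p.1 ≤ q.1) :=
      (List.pairwise_cons.mp hs).2
    by_cases h : y2 = y
    · subst h
      obtain ⟨rest, hr, hz⟩ := ih y2 d2 hs'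
      exact ⟨rest, by simpa [pvYears] using hr, hz⟩
    · have hlt : y < y2 := lt_of_le_of_ne hle (fun e => h e.symm)
      refine ⟨pvYears ((y2, d2) :: t'), by simp [pvYears, h], ?_⟩
      intro z hz
      have hmem : z ∈ ((y2, d2) :: t').map Prod.fst := (mem_pvYears _ _).mp hz
      rw [List.mem_map] at hmem
      obtain ⟨p, hp, rfl⟩ := hmem
      rcases List.mem_cons.mp hp with rfl | hp'
      · exact hlt
      · have : y2 ≤ p.1 := (List.pairwise_cons.mp hs').1 _ hp'
        omega

theorem pvYears_pairwise (E : List (Int × Int))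
    (hs : E.Pairwise (fun p q => p.1 ≤ q.1)) :
    (pvYears E).Pairwise (· < ·) := by
  induction E with
  | nil => exact List.Pairwise.nil
  | cons p t ih =>
    obtain ⟨y, d⟩ := p
    have ht : (pvYears t).Pairwise (· < ·) := ih (List.pairwise_cons.mp hs).2
    cases t with
    | nil => simp [pvYears]
    | cons q t' =>
      obtain ⟨y2, d2⟩ := q
      by_cases h : y2 = y
      · simpa [pvYears, h] using ht
      · obtain ⟨rest, hr, hz⟩ := pvYears_head y d ((y2, d2) :: t') hs
        rw [show pvYears ((y, d) :: (y2, d2) :: t') = y :: pvYears ((y2, d2) :: t') from by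
          simp [pvYears, h]] at hr ⊢
        have hre : rest = pvYears ((y2, d2) :: t') := by
          have := hr.symm
          simpa using this
        subst hre
        exact List.pairwise_cons.mpr ⟨hz, ht⟩

-- fold congruence in the delta function
theorem pvF_congr (c1 c2 : Int → Int) (ys : List Int) (s : Int × Int × Int)
    (h : ∀ z ∈ ys, c1 z = c2 z) : pvF c1 ys s = pvF c2 ys s := by
  induction ys generalizing s with
  | nil => rfl
  | cons y t ih =>
    simp only [pvF, List.foldl_cons]
    rw [show pvStep c1 s y = pvStep c2 s y from by
      simp [pvStep, h y (List.mem_cons_self)]]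
    exact ih _ (fun z hz => h z (List.mem_cons_of_mem _ hz))

-- the sweep over a year-sorted event list is the canonical fold over its distinct years
theorem sweep_eq (E : List (Int × Int))
    (hs : E.Pairwise (fun p q => p.1 ≤ q.1)) :
    ∀ r m a, pvSweep E r m a = (pvF (pvG E) (pvYears E) (m, a, r)).2.2 := by
  induction E with
  | nil => intro r m a; rfl
  | cons p t ih =>
    obtain ⟨y, d⟩ := p
    intro r m a
    have hs' := (List.pairwise_cons.mp hs).2
    have hyle := (List.pairwise_cons.mp hs).1
    cases t with
    | nil =>
      rw [show pvYears [(y, d)] = [y] from rfl]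
      simp only [pvSweep, pvF, List.foldl_cons, List.foldl_nil, pvStep, pvG_cons]
      rw [show pvG ([] : List (Int × Int)) y = 0 from rfl]
      simp only [add_zero]
      split_ifs <;> rfl
    | cons q t' =>
      obtain ⟨y2, d2⟩ := q
      have hy2 : y ≤ y2 := by simpa using hyle _ (List.mem_cons_self)
      by_cases h : y2 = y
      · -- same year: the group continues, no comparison yet
        subst h
        rw [show pvYears ((y2, d) :: (y2, d2) :: t') = pvYears ((y2, d2) :: t') from by
          simp [pvYears]]
        rw [show pvSweep ((y2, d) :: (y2, d2) :: t') r m a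
            = pvSweep ((y2, d2) :: t') r m (a + d) from by simp [pvSweep]]
        rw [ih hs' r m (a + d)]
        obtain ⟨rest, hr, hrest⟩ := pvYears_head y2 d2 t' hs'
        rw [hr]
        simp only [pvF, List.foldl_cons]
        have hX : pvG ((y2, d) :: (y2, d2) :: t') y2 = d + pvG ((y2, d2) :: t') y2 := by
          rw [pvG_cons]
          norm_num
        have hstep : pvStep (pvG ((y2, d) :: (y2, d2) :: t')) (m, a, r) y2
            = pvStep (pvG ((y2, d2) :: t')) (m, a + d, r) y2 := by
          simp only [pvStep]
          rw [hX, show a + (d + pvG ((y2, d2) :: t') y2)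
            = a + d + pvG ((y2, d2) :: t') y2 from by ring]
        rw [hstep]
        refine congrArg (fun x => x.2.2)
          (pvF_congr (pvG ((y2, d2) :: t')) (pvG ((y2, d) :: (y2, d2) :: t')) rest
            (pvStep (pvG ((y2, d2) :: t')) (m, a + d, r) y2) ?_)
        intro z hz
        rw [show pvG ((y2, d) :: (y2, d2) :: t') z = pvG ((y2, d2) :: t') z from by
          rw [pvG_cons, if_neg (by simpa using (hrest z hz).ne), zero_add]]
      · -- new year: compare at y, then sweep the rest
        have hlt : y < y2 := lt_of_le_of_ne hy2 (fun e => h e.symm)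
        have hzgt : ∀ z ∈ pvYears ((y2, d2) :: t'), y < z := by
          intro z hz
          have hmem := (mem_pvYears _ _).mp hz
          rw [List.mem_map] at hmem
          obtain ⟨p, hp, rfl⟩ := hmem
          rcases List.mem_cons.mp hp with rfl | hp'
          · exact hlt
          · have := (List.pairwise_cons.mp hs').1 _ hp'
            omega
        have hGy : pvG ((y, d) :: (y2, d2) :: t') y = d := by
          rw [pvG_cons, if_pos rfl, pvG_not_mem, add_zero]
          intro hmem
          rw [List.mem_map] at hmem
          obtain ⟨p, hp, hfst⟩ := hmem
          rcases List.mem_cons.mp hp with hpe | hp'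
          · rw [hpe] at hfst; simp at hfst; omega
          · have := (List.pairwise_cons.mp hs').1 _ hp'; omega
        have hGtail : ∀ z ∈ pvYears ((y2, d2) :: t'),
            pvG ((y2, d2) :: t') z = pvG ((y, d) :: (y2, d2) :: t') z := by
          intro z hz
          rw [show pvG ((y, d) :: (y2, d2) :: t') z = pvG ((y2, d2) :: t') z from by
            rw [pvG_cons, if_neg (by simpa using (hzgt z hz).ne), zero_add]]
        rw [show pvYears ((y, d) :: (y2, d2) :: t') = y :: pvYears ((y2, d2) :: t') from by
          simp [pvYears, h]]
        rw [show pvSweep ((y, d) :: (y2, d2) :: t') r m a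
            = (if a + d > m then pvSweep ((y2, d2) :: t') y (a + d) (a + d)
               else pvSweep ((y2, d2) :: t') r m (a + d)) from by simp [pvSweep, h]]
        have hstep2 : pvStep (pvG ((y, d) :: (y2, d2) :: t')) (m, a, r) y
            = if a + d > m then (a + d, a + d, y) else (m, a + d, r) := by
          simp only [pvStep, hGy]
        simp only [pvF, List.foldl_cons]
        rw [hstep2]
        split_ifs with hgt
        · rw [ih hs' y (a + d) (a + d)]
          exact congrArg (fun x => x.2.2)
            (pvF_congr (pvG ((y2, d2) :: t')) (pvG ((y, d) :: (y2, d2) :: t'))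
              (pvYears ((y2, d2) :: t')) (a + d, a + d, y) hGtail)
        · rw [ih hs' r m (a + d)]
          exact congrArg (fun x => x.2.2)
            (pvF_congr (pvG ((y2, d2) :: t')) (pvG ((y, d) :: (y2, d2) :: t'))
              (pvYears ((y2, d2) :: t')) (m, a + d, r) hGtail)

-- zero-delta years are no-ops of the scan: fold over ys = fold over its nonzero-delta sublist
theorem pvF_filter (c : Int → Int) (ys : List Int) :
    ∀ m a r, a ≤ m →
      pvF c ys (m, a, r) = pvF c (ys.filter (fun z => decide (c z ≠ 0))) (m, a, r) := by
  induction ys with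
  | nil => intro m a r _; rfl
  | cons y t ih =>
    intro m a r hinv
    by_cases h : c y = 0
    · have hd : (decide (c y ≠ 0)) = false := by simpa using h
      simp only [pvF, List.foldl_cons, List.filter_cons, hd, if_neg Bool.false_ne_true]
      simp only [pvStep, h, add_zero]
      rw [if_neg (by omega)]
      simpa [pvF] using ih m a r hinv
    · have hd : (decide (c y ≠ 0)) = true := by simpa using h
      rw [show (y :: t).filter (fun z => decide (c z ≠ 0))
          = y :: t.filter (fun z => decide (c z ≠ 0)) from by rw [List.filter_cons, if_pos hd]]
      simp only [pvF, List.foldl_cons]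
      simp only [pvStep]
      split_ifs with hgt
      · exact ih _ _ _ (le_refl _)
      · exact ih _ _ _ (by omega)

-- A's loop body with the subtraction re-associated is the canonical step
theorem A_fold_eq (cb cd : Int → Int) (ys : List Int) :
    ∀ s : Int × Int × Int,
      ys.foldl (fun (s : Int × Int × Int) i =>
        let a := s.2.1 + cb i - cd i
        if a > s.1 then (a, a, i) else (s.1, a, s.2.2)) s
      = pvF (fun i => cb i - cd i) ys s := by
  induction ys with
  | nil => intro s; rfl
  | cons y t ih =>
    intro s
    simp only [List.foldl_cons, pvF, pvStep]
    rw [show s.2.1 + cb y - cd y = s.2.1 + (cb y - cd y) from by ring]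
    exact ih _

-- a comprehension '[logs[i][k] for i in range(len(logs))]' is a map over logs
theorem map_proj (logs : List (List Int)) (k : Int) :
    ((PySem.List.pyRange 0 (logs.length : Int) 1).map
      (fun i => PySem.List.pyGetD (PySem.List.pyGetD logs i []) k 0))
    = logs.map (fun l => PySem.List.pyGetD l k 0) := by
  rw [show (fun i => PySem.List.pyGetD (PySem.List.pyGetD logs i ([] : List Int)) k 0)
      = ((fun l => PySem.List.pyGetD l k 0) ∘ (fun i => PySem.List.pyGetD logs i ([] : List Int)))
      from rfl,
    ← List.map_map, PySem.List.map_pyGetD_pyRange_zero']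

-- the in-range test and B's event list, in proof-side vocabulary
def pvQ : Int → Bool := fun b => decide (1950 ≤ b ∧ b ≤ 2050)
def pvEvents (logs : List (List Int)) : List (Int × Int) :=
  (((pvBirths logs).filter pvQ).map (fun b => (b, (1 : Int))))
  ++ (((pvDeaths logs).filter pvQ).map (fun b => (b, (-1 : Int))))
def pvE (logs : List (List Int)) : List (Int × Int) :=
  PySem.List.sorted (pvEvents logs) (fun e => e.1) false

theorem alt_eq (logs : List (List Int)) :
    solution_1261_3_alt logs = pvSweep (pvE logs) 1950 0 0 := by
  unfold solution_1261_3_alt pvE pvEvents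
  rw [show ((logs.filter (fun log => decide (1950 ≤ PySem.List.pyGetD log 0 0 ∧ PySem.List.pyGetD log 0 0 ≤ 2050))).map
      (fun log => (PySem.List.pyGetD log 0 0, (1 : Int))))
      = ((pvBirths logs).filter pvQ).map (fun b => (b, (1 : Int))) from by
    rw [pvBirths, List.filter_map, List.map_map]; rfl]
  rw [show ((logs.filter (fun log => decide (1950 ≤ PySem.List.pyGetD log 1 0 ∧ PySem.List.pyGetD log 1 0 ≤ 2050))).map
      (fun log => (PySem.List.pyGetD log 1 0, (-1 : Int))))
      = ((pvDeaths logs).filter pvQ).map (fun b => (b, (-1 : Int))) from by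
    rw [pvDeaths, List.filter_map, List.map_map]; rfl]

theorem pvE_pairwise (logs : List (List Int)) :
    (pvE logs).Pairwise (fun p q => p.1 ≤ q.1) := by
  simpa using PySem.List.sorted_pairwise (pvEvents logs) (fun e => e.1)

theorem mem_fst_pvE (logs : List (List Int)) (z : Int) :
    z ∈ (pvE logs).map Prod.fst ↔ pvQ z = true ∧ (z ∈ pvBirths logs ∨ z ∈ pvDeaths logs) := by
  rw [List.mem_map]
  constructor
  · rintro ⟨p, hp, rfl⟩
    have hp' : p ∈ pvEvents logs :=
      (PySem.List.mem_sorted (pvEvents logs) (fun e => e.1) false p).mp hp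
    simp only [pvEvents, List.mem_append, List.mem_map, List.mem_filter] at hp'
    rcases hp' with ⟨b, ⟨hb, hqb⟩, rfl⟩ | ⟨b, ⟨hb, hqb⟩, rfl⟩ <;> exact ⟨hqb, by tauto⟩
  · rintro ⟨hqz, hz⟩
    have : (z, (1 : Int)) ∈ pvEvents logs ∨ (z, (-1 : Int)) ∈ pvEvents logs := by
      simp only [pvEvents, List.mem_append, List.mem_map, List.mem_filter]
      rcases hz with hz | hz
      · exact Or.inl (Or.inl ⟨z, ⟨hz, hqz⟩, rfl⟩)
      · exact Or.inr (Or.inr ⟨z, ⟨hz, hqz⟩, rfl⟩)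
    rcases this with hm | hm
    · exact ⟨(z, 1), (PySem.List.mem_sorted _ _ _ _).mpr hm, rfl⟩
    · exact ⟨(z, -1), (PySem.List.mem_sorted _ _ _ _).mpr hm, rfl⟩

theorem pvG_pvE (logs : List (List Int)) (z : Int) (hqz : pvQ z = true) :
    pvG (pvE logs) z = pvC logs z := by
  unfold pvE
  rw [pvG_perm _ _ (PySem.List.sorted_perm (pvEvents logs) (fun e => e.1) false) z]
  rw [pvEvents, pvG_append, pvG_map_const, pvG_map_const,
    List.count_filter hqz, List.count_filter hqz]
  unfold pvC
  ring

-- ===== VERDICT (by name: the statement is the Claim_ definition above) =====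
theorem solution_1261_3_spec : Claim_equal_solution_1261_3 := by
  intro logs _ _
  unfold Spec_solution_1261_3
  rw [alt_eq, sweep_eq (pvE logs) (pvE_pairwise logs) 1950 0 0]
  unfold solution_1261_3
  simp only [map_proj, PySem.List.count_eq]
  rw [A_fold_eq (fun i => ((logs.map (fun l => PySem.List.pyGetD l 0 0)).count i : Int))
      (fun i => ((logs.map (fun l => PySem.List.pyGetD l 1 0)).count i : Int))
      (PySem.List.pyRange 1950 2051 1) (0, 0, 1950)]
  have hC : (fun i => ((logs.map (fun l => PySem.List.pyGetD l 0 0)).count i : Int)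
      - ((logs.map (fun l => PySem.List.pyGetD l 1 0)).count i : Int)) = pvC logs := rfl
  rw [hC]
  -- years of the sweep are in range, and carry A's per-year delta
  have hrange : ∀ z ∈ pvYears (pvE logs), pvQ z = true := by
    intro z hz
    exact ((mem_fst_pvE logs z).mp ((mem_pvYears _ _).mp hz)).1
  have hGC : ∀ z ∈ pvYears (pvE logs), pvG (pvE logs) z = pvC logs z :=
    fun z hz => pvG_pvE logs z (hrange z hz)
  -- both scans drop their zero-delta years, and the remaining year lists coincide
  have hfilter : (PySem.List.pyRange 1950 2051 1).filter (fun z => decide (pvC logs z ≠ 0))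
      = (pvYears (pvE logs)).filter (fun z => decide (pvC logs z ≠ 0)) := by
    have hpw1 : ((PySem.List.pyRange 1950 2051 1).filter (fun z => decide (pvC logs z ≠ 0))).Pairwise (· < ·) :=
      List.Pairwise.filter _ (PySem.List.pairwise_lt_pyRange_one 1950 2051)
    have hpw2 : ((pvYears (pvE logs)).filter (fun z => decide (pvC logs z ≠ 0))).Pairwise (· < ·) :=
      List.Pairwise.filter _ (pvYears_pairwise _ (pvE_pairwise logs))
    have hmem : ∀ a, a ∈ (PySem.List.pyRange 1950 2051 1).filter (fun z => decide (pvC logs z ≠ 0))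
        ↔ a ∈ (pvYears (pvE logs)).filter (fun z => decide (pvC logs z ≠ 0)) := by
      intro a
      simp only [List.mem_filter, PySem.List.mem_pyRange_one, mem_pvYears, mem_fst_pvE,
        decide_eq_true_eq]
      constructor
      · rintro ⟨⟨h1, h2⟩, hc⟩
        refine ⟨⟨by simp [pvQ]; omega, ?_⟩, hc⟩
        by_contra hboth
        rw [not_or] at hboth
        have hb0 : (pvBirths logs).count a = 0 := List.count_eq_zero.mpr hboth.1
        have hd0 : (pvDeaths logs).count a = 0 := List.count_eq_zero.mpr hboth.2
        exact hc (by simp [pvC, hb0, hd0])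
      · rintro ⟨⟨hq, _⟩, hc⟩
        have : 1950 ≤ a ∧ a ≤ 2050 := by simpa [pvQ] using hq
        exact ⟨⟨this.1, by omega⟩, hc⟩
    exact PySem.List.eq_of_perm_of_pairwise_le
      ((List.perm_ext_iff_of_nodup
        (List.Pairwise.imp (fun h => ne_of_lt h) hpw1)
        (List.Pairwise.imp (fun h => ne_of_lt h) hpw2)).mpr hmem)
      (hpw1.imp (fun h => le_of_lt h)) (hpw2.imp (fun h => le_of_lt h))
  calc (pvF (pvC logs) (PySem.List.pyRange 1950 2051 1) (0, 0, 1950)).2.2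
      = (pvF (pvC logs) ((PySem.List.pyRange 1950 2051 1).filter (fun z => decide (pvC logs z ≠ 0))) (0, 0, 1950)).2.2 := by
        rw [pvF_filter (pvC logs) _ 0 0 1950 (le_refl 0)]
    _ = (pvF (pvC logs) ((pvYears (pvE logs)).filter (fun z => decide (pvC logs z ≠ 0))) (0, 0, 1950)).2.2 := by
        rw [hfilter]
    _ = (pvF (pvC logs) (pvYears (pvE logs)) (0, 0, 1950)).2.2 := by
        rw [← pvF_filter (pvC logs) _ 0 0 1950 (le_refl 0)]
    _ = (pvF (pvG (pvE logs)) (pvYears (pvE logs)) (0, 0, 1950)).2.2 := by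
        rw [pvF_congr _ _ _ _ (fun z hz => (hGC z hz).symm)]
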